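-- pv_equiv track=rewrite | github.com/ajmaurais/DIA_QC_report | tests/test_bitmask_parsing.py | permute_options
-- ===== SOURCE A (Python) =====
-- from itertools import product
--
-- def permute_options(digit_names, option_map, method_names):
--     std = {}
--     for digits in product(*[range(len(option_map)) for _ in range(len(digit_names))]):
--         key = ''.join(str(x) for x in digits)
--         std[key] = {}
--         for i in range(len(digit_names)):
--             std[key][digit_names[i]] = dict(zip(method_names, option_map[digits[i]]))
--
--     return std
-- ===== SOURCE B (Python) =====
-- def permute_options(digit_names, option_map, method_names):
--     # Decode each option row once into a table, then expand the combinations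
--     # recursively, prepending the current digit's entry to every sub-result.
--     decoded = [list(zip(method_names, row)) for row in option_map]
--
--     def expand(names):
--         if not names:
--             return [('', [])]
--         name, rest = names[0], names[1:]
--         sub = expand(rest)
--         return [(str(j) + key, [(name, dict(decoded[j]))] + row)
--                 for j in range(len(option_map))
--                 for key, row in sub]
--
--     return {key: dict(row) for key, row in expand(digit_names)}
-- ===== Notes on version B (the rewrite author's own statement) =====
-- stated objective: alternative
-- what changed: B decodes each option row into a (method,value) pair table once, then builds all key/row combinations by structural recursion over digit_names (prepending the current digit's entry to every sub-result) instead of iterating itertools.product and re-zipping method_names with option_map for every digit of every combination.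
import Mathlib
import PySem

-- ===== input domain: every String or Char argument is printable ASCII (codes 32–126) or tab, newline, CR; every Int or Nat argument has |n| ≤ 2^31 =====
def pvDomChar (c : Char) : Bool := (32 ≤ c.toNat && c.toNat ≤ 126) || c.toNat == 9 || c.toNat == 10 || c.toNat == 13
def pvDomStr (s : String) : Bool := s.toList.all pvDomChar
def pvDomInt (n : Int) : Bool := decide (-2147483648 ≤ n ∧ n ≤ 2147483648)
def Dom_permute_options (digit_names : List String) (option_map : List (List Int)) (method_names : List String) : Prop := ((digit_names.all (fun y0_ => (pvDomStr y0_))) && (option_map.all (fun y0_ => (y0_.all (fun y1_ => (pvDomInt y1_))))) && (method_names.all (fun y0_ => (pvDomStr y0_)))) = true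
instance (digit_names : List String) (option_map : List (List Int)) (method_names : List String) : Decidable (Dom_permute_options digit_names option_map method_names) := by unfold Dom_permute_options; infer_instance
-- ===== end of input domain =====

-- B precomputes a table of decoded option rows and expands the digit
-- combinations by structural recursion over digit_names, instead of A's
-- itertools.product loop that re-zips method_names for every digit of every
-- combination (objective: alternative decomposition; each row is zipped once).

-- Shared Python-dict primitives on association lists (insertion order,
-- overwrite in place, append new keys) — exact for Python dict assignment.
def pyIns {α : Type} (d : List (String × α)) (k : String) (v : α) : List (String × α) :=
  match d with
  | [] => [(k, v)]
  | (k', v') :: rest => if k' = k then (k, v) :: rest else (k', v') :: pyIns rest k v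

-- d[k] mutated in place (first matching binding); in both ports it is only
-- applied when k is present, so the [] case is unreachable.
def pyModify {α : Type} (d : List (String × α)) (k : String) (f : α → α) : List (String × α) :=
  match d with
  | [] => []
  | (k', v') :: rest => if k' = k then (k', f v') :: rest else (k', v') :: pyModify rest k f

-- dict(pairs): insert each pair in order (later duplicates overwrite in place)
def pyDict {α : Type} (ps : List (String × α)) : List (String × α) :=
  ps.foldl (fun d p => pyIns d p.1 p.2) []

-- ===== PORT A =====
-- product(*[range(n) for _ in range(k)]), first component varies slowest
def pvProd (n : Nat) : Nat → List (List Nat)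
  | 0 => [[]]
  | k + 1 => (List.range n).flatMap (fun d => (pvProd n k).map (d :: ·))

-- ''.join(str(x) for x in digits)
def pvJoin : List Nat → String
  | [] => ""
  | d :: ds => PySem.Int.toStr (d : Int) ++ pvJoin ds

def permute_options (digit_names : List String) (option_map : List (List Int)) (method_names : List String) : List (String × List (String × List (String × Int))) :=
  (pvProd option_map.length digit_names.length).foldl
    (fun std digits =>
      let key := pvJoin digits
      let std := pyIns std key []
      (List.range digit_names.length).foldl
        (fun std i =>
          pyModify std key (fun inner =>
            pyIns inner (digit_names.getD i "")
              (pyDict (method_names.zip (option_map.getD (digits.getD i 0) [])))))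
        std)
    []

-- ===== PORT B =====
-- expand(names): recursive comprehension prepending the current digit's entry
def pvExpand (n : Nat) (decoded : List (List (String × Int))) : List String → List (String × List (String × List (String × Int)))
  | [] => [("", [])]
  | name :: rest =>
      let sub := pvExpand n decoded rest
      (List.range n).flatMap (fun j =>
        sub.map (fun kr =>
          (PySem.Int.toStr (Int.ofNat j) ++ kr.1, (name, pyDict (decoded.getD j [])) :: kr.2)))

def permute_options_alt (digit_names : List String) (option_map : List (List Int)) (method_names : List String) : List (String × List (String × List (String × Int))) :=
  let decoded := option_map.map (fun row => method_names.zip row)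
  (pvExpand option_map.length decoded digit_names).foldl
    (fun std kr => pyIns std kr.1 (pyDict kr.2)) []

-- ===== PRECONDITION & SPEC =====
def Spec_permute_options (digit_names : List String) (option_map : List (List Int)) (method_names : List String) (out : List (String × List (String × List (String × Int)))) : Prop := out = permute_options_alt digit_names option_map method_names
instance (digit_names : List String) (option_map : List (List Int)) (method_names : List String) (out : List (String × List (String × List (String × Int)))) : Decidable (Spec_permute_options digit_names option_map method_names out) := by unfold Spec_permute_options; infer_instance

-- ===== CLAIM (what is proved, stated in full; the proofs are below) =====
def Claim_equal_permute_options : Prop := ∀ (digit_names : List String) (option_map : List (List Int)) (method_names : List String), Dom_permute_options digit_names option_map method_names → Spec_permute_options digit_names option_map method_names (permute_options digit_names option_map method_names)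

-- ===== LEMMAS AND PROOFS =====

-- the row of pairs B builds for a digit tuple ds
def pvRow (decoded : List (List (String × Int))) (dn : List String) (ds : List Nat) : List (String × List (String × Int)) :=
  (dn.zip ds).map (fun p => (p.1, pyDict (decoded.getD p.2 [])))

theorem pvProd_length {n k : Nat} {ds : List Nat} (h : ds ∈ pvProd n k) : ds.length = k := by
  induction k generalizing ds with
  | zero => simp [pvProd] at h; simp [h]
  | succ k ih =>
    simp only [pvProd, List.mem_flatMap, List.mem_map] at h
    obtain ⟨d, _, t, ht, rfl⟩ := h
    simp [ih ht]

theorem pvExpand_spec (n : Nat) (decoded : List (List (String × Int))) (dn : List String) :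
    pvExpand n decoded dn = (pvProd n dn.length).map (fun ds => (pvJoin ds, pvRow decoded dn ds)) := by
  induction dn with
  | nil => simp [pvExpand, pvProd, pvJoin, pvRow]
  | cons name rest ih =>
    simp only [pvExpand, ih, List.length_cons, pvProd, List.map_flatMap, List.map_map]
    apply List.flatMap_congr
    intro j _
    apply List.map_congr_left
    intro ds _
    simp [pvRow, pvJoin, List.zip]

theorem pyModify_pyIns {α : Type} (d : List (String × α)) (k : String) (v : α) (f : α → α) :
    pyModify (pyIns d k v) k f = pyIns d k (f v) := by
  induction d with
  | nil => simp [pyIns, pyModify]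
  | cons p rest ih =>
    obtain ⟨k', v'⟩ := p
    by_cases h : k' = k <;> simp [pyIns, pyModify, h, ih]

theorem foldl_modify_pyIns {α : Type} (l : List Nat) (std : List (String × α)) (k : String) (g : Nat → α → α) (v : α) :
    l.foldl (fun std i => pyModify std k (g i)) (pyIns std k v)
      = pyIns std k (l.foldl (fun v i => g i v) v) := by
  induction l generalizing v with
  | nil => rfl
  | cons a t ih => simp only [List.foldl_cons, pyModify_pyIns, ih]

theorem range_getD_zip {α β : Type} (x : α) (y : β) (l1 : List α) :
    ∀ l2 : List β, l1.length = l2.length →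
      (List.range l1.length).map (fun i => (l1.getD i x, l2.getD i y)) = l1.zip l2 := by
  induction l1 with
  | nil => intro l2 h; simp
  | cons a t ih =>
    intro l2 h
    cases l2 with
    | nil => simp at h
    | cons b t2 =>
      simp only [List.length_cons, List.range_succ_eq_map, List.map_cons, List.map_map]
      simp only [List.length_cons, Nat.succ_inj] at h
      have := ih t2 h
      simp only [List.zip_cons_cons]
      refine congrArg₂ List.cons (by simp) ?_
      rw [← this]; apply List.map_congr_left; intro i _; simp

theorem decoded_getD (mn : List String) (o : Option (List Int)) :
    (Option.map (fun row => mn.zip row) o).getD [] = mn.zip (o.getD []) := by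
  cases o <;> simp

theorem pvBody_eq (dn mn : List String) (om : List (List Int)) (ds : List Nat)
    (hlen : ds.length = dn.length)
    (std : List (String × List (String × List (String × Int)))) :
    (List.range dn.length).foldl
        (fun std i =>
          pyModify std (pvJoin ds) (fun inner =>
            pyIns inner (dn.getD i "")
              (pyDict (mn.zip (om.getD (ds.getD i 0) [])))))
        (pyIns std (pvJoin ds) [])
      = pyIns std (pvJoin ds)
          (pyDict (pvRow (om.map (fun row => mn.zip row)) dn ds)) := by
  rw [foldl_modify_pyIns]
  congr 1
  have hz := range_getD_zip "" 0 dn ds hlen.symm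
  unfold pyDict pvRow
  rw [← hz, List.foldl_map, List.foldl_map]
  apply PySem.List.foldl_congr_mem
  intro acc i _
  simp [pyDict, decoded_getD]

-- ===== VERDICT (by name: the statement is the Claim_ definition above) =====
theorem permute_options_spec : Claim_equal_permute_options := by
  intro dn om mn _
  unfold Spec_permute_options
  simp only [permute_options, permute_options_alt]
  rw [pvExpand_spec, List.foldl_map]
  apply PySem.List.foldl_congr_mem
  intro std ds hds
  exact pvBody_eq dn mn om ds (pvProd_length hds) std
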